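-- pv_equiv track=rewrite | github.com/ravish-oo/opoch-toe-arcagi | src/arcbit/emitters/witness_learn.py | _compute_posed_bbox
-- ===== SOURCE A (Python) =====
-- from typing import TypedDict, List, Dict, Tuple, Optional, Any
--
-- def _compute_posed_bbox(
--     bbox: Tuple[int, int, int, int],
--     H: int,
--     W: int,
--     pid: str
-- ) -> Tuple[int, int, int, int]:
--     """
--     Compute bounding box after applying pose.
--
--     For a bbox (rmin, cmin, rmax, cmax), apply pose pid and return new bbox.
--     """
--     rmin, cmin, rmax, cmax = bbox
--
--     # Create corners of bbox
--     corners = [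
--         (rmin, cmin),
--         (rmin, cmax),
--         (rmax, cmin),
--         (rmax, cmax)
--     ]
--
--     # Transform each corner
--     posed_corners = []
--     for r, c in corners:
--         r_new, c_new = _apply_pose_to_point(r, c, H, W, pid)
--         posed_corners.append((r_new, c_new))
--
--     # Compute new bbox
--     r_vals = [r for r, c in posed_corners]
--     c_vals = [c for r, c in posed_corners]
--
--     return (min(r_vals), min(c_vals), max(r_vals), max(c_vals))
--
-- def _apply_pose_to_point(r: int, c: int, H: int, W: int, pid: str) -> Tuple[int, int]:
--     """Apply pose transformation to a point (r, c)."""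
--     if pid == "I":
--         return (r, c)
--     elif pid == "R90":
--         return (c, H - 1 - r)
--     elif pid == "R180":
--         return (H - 1 - r, W - 1 - c)
--     elif pid == "R270":
--         return (W - 1 - c, r)
--     elif pid == "FX":
--         return (r, W - 1 - c)
--     elif pid == "FXR90":
--         return (c, W - 1 - r)
--     elif pid == "FXR180":
--         return (H - 1 - r, c)
--     elif pid == "FXR270":
--         return (W - 1 - c, H - 1 - r)
--     else:
--         raise ValueError(f"Unknown pose ID: {pid}")
-- ===== SOURCE B (Python) =====
-- def _compute_posed_bbox(bbox, H, W, pid):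
--     """Closed form: each pose maps the r- and c-ranges independently, so
--     transform the two endpoints of each range and sort them; no corner list."""
--     rmin, cmin, rmax, cmax = bbox
--     if pid == "I":
--         ra, rb, ca, cb = rmin, rmax, cmin, cmax
--     elif pid == "R90":
--         ra, rb, ca, cb = cmin, cmax, H - 1 - rmin, H - 1 - rmax
--     elif pid == "R180":
--         ra, rb, ca, cb = H - 1 - rmin, H - 1 - rmax, W - 1 - cmin, W - 1 - cmax
--     elif pid == "R270":
--         ra, rb, ca, cb = W - 1 - cmin, W - 1 - cmax, rmin, rmax
--     elif pid == "FX":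
--         ra, rb, ca, cb = rmin, rmax, W - 1 - cmin, W - 1 - cmax
--     elif pid == "FXR90":
--         ra, rb, ca, cb = cmin, cmax, W - 1 - rmin, W - 1 - rmax
--     elif pid == "FXR180":
--         ra, rb, ca, cb = H - 1 - rmin, H - 1 - rmax, cmin, cmax
--     elif pid == "FXR270":
--         ra, rb, ca, cb = W - 1 - cmin, W - 1 - cmax, H - 1 - rmin, H - 1 - rmax
--     else:
--         raise ValueError(f"Unknown pose ID: {pid}")
--     return (min(ra, rb), min(ca, cb), max(ra, rb), max(ca, cb))
-- ===== Notes on version B (the rewrite author's own statement) =====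
-- stated objective: simpler
-- what changed: B replaces the corner list, the per-point pose helper and the min/max scans over four posed corners by a closed-form per-pose mapping of the two range endpoints, since every pose maps r- and c-ranges independently.
import Mathlib
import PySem

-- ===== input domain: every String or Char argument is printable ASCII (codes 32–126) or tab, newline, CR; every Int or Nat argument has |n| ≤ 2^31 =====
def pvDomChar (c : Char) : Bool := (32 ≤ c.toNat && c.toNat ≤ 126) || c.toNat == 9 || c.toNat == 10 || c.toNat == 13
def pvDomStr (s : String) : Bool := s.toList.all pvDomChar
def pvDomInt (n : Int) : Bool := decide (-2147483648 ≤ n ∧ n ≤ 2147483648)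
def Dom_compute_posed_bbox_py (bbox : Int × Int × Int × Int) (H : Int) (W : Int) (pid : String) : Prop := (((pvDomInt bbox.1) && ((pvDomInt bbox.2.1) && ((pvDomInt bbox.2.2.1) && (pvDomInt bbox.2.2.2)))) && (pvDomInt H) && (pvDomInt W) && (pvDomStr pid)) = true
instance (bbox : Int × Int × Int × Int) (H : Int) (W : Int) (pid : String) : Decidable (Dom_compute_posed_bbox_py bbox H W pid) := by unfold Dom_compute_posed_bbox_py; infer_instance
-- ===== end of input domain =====

-- B replaces A's corner list + per-point helper + min/max scans by a closed-form
-- per-pose mapping of the two range endpoints (objective: simpler).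
-- Equivalence is about the RETURN value; both raise ValueError on unknown pid (outside Pre_).

-- ===== PORT A =====
-- helper _apply_pose_to_point; none = the explicit 'raise ValueError' branch
def applyPoseToPoint (r c H W : Int) (pid : String) : Option (Int × Int) :=
  if pid = "I" then some (r, c)
  else if pid = "R90" then some (c, H - 1 - r)
  else if pid = "R180" then some (H - 1 - r, W - 1 - c)
  else if pid = "R270" then some (W - 1 - c, r)
  else if pid = "FX" then some (r, W - 1 - c)
  else if pid = "FXR90" then some (c, W - 1 - r)
  else if pid = "FXR180" then some (H - 1 - r, c)
  else if pid = "FXR270" then some (W - 1 - c, H - 1 - r)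
  else none

def compute_posed_bbox_py (bbox : Int × Int × Int × Int) (H : Int) (W : Int) (pid : String) : Int × Int × Int × Int :=
  let rmin := bbox.1; let cmin := bbox.2.1; let rmax := bbox.2.2.1; let cmax := bbox.2.2.2
  let corners : List (Int × Int) := [(rmin, cmin), (rmin, cmax), (rmax, cmin), (rmax, cmax)]
  match corners.mapM (fun p => applyPoseToPoint p.1 p.2 H W pid) with
  | none => (0, 0, 0, 0)  -- Python raises ValueError here; excluded by Pre_
  | some posed =>
    let rvals := posed.map Prod.fst
    let cvals := posed.map Prod.snd
    ((PySem.List.min? rvals (fun x => x)).getD 0, (PySem.List.min? cvals (fun x => x)).getD 0,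
     (PySem.List.max? rvals (fun x => x)).getD 0, (PySem.List.max? cvals (fun x => x)).getD 0)

-- ===== PORT B =====
def compute_posed_bbox_py_alt (bbox : Int × Int × Int × Int) (H : Int) (W : Int) (pid : String) : Int × Int × Int × Int :=
  let rmin := bbox.1; let cmin := bbox.2.1; let rmax := bbox.2.2.1; let cmax := bbox.2.2.2
  let e : Int × Int × Int × Int :=
    if pid = "I" then (rmin, rmax, cmin, cmax)
    else if pid = "R90" then (cmin, cmax, H - 1 - rmin, H - 1 - rmax)
    else if pid = "R180" then (H - 1 - rmin, H - 1 - rmax, W - 1 - cmin, W - 1 - cmax)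
    else if pid = "R270" then (W - 1 - cmin, W - 1 - cmax, rmin, rmax)
    else if pid = "FX" then (rmin, rmax, W - 1 - cmin, W - 1 - cmax)
    else if pid = "FXR90" then (cmin, cmax, W - 1 - rmin, W - 1 - rmax)
    else if pid = "FXR180" then (H - 1 - rmin, H - 1 - rmax, cmin, cmax)
    else if pid = "FXR270" then (W - 1 - cmin, W - 1 - cmax, H - 1 - rmin, H - 1 - rmax)
    else (0, 0, 0, 0)  -- Python raises ValueError here; excluded by Pre_
  (min e.1 e.2.1, min e.2.2.1 e.2.2.2, max e.1 e.2.1, max e.2.2.1 e.2.2.2)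

-- ===== PRECONDITION & SPEC =====
-- Pre_ excludes exactly the unknown pose IDs, on which A raises ValueError
def Pre_compute_posed_bbox_py (bbox : Int × Int × Int × Int) (H : Int) (W : Int) (pid : String) : Prop :=
  pid = "I" ∨ pid = "R90" ∨ pid = "R180" ∨ pid = "R270" ∨ pid = "FX" ∨ pid = "FXR90" ∨ pid = "FXR180" ∨ pid = "FXR270"
instance (bbox : Int × Int × Int × Int) (H : Int) (W : Int) (pid : String) : Decidable (Pre_compute_posed_bbox_py bbox H W pid) := by unfold Pre_compute_posed_bbox_py; infer_instance
def pvWitness_compute_posed_bbox_py : (Int × Int × Int × Int) × Int × Int × String := ((0, 1, 2, 3), 4, 5, "R90")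

def Spec_compute_posed_bbox_py (bbox : Int × Int × Int × Int) (H : Int) (W : Int) (pid : String) (out : Int × Int × Int × Int) : Prop := out = compute_posed_bbox_py_alt bbox H W pid
instance (bbox : Int × Int × Int × Int) (H : Int) (W : Int) (pid : String) (out : Int × Int × Int × Int) : Decidable (Spec_compute_posed_bbox_py bbox H W pid out) := by unfold Spec_compute_posed_bbox_py; infer_instance

-- ===== CLAIM (what is proved, stated in full; the proofs are below) =====
def Claim_equal_compute_posed_bbox_py : Prop := ∀ (bbox : Int × Int × Int × Int) (H : Int) (W : Int) (pid : String), Dom_compute_posed_bbox_py bbox H W pid → Pre_compute_posed_bbox_py bbox H W pid → Spec_compute_posed_bbox_py bbox H W pid (compute_posed_bbox_py bbox H W pid)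

-- ===== LEMMAS AND PROOFS =====

-- ===== VERDICT (by name: the statement is the Claim_ definition above) =====
theorem compute_posed_bbox_py_spec : Claim_equal_compute_posed_bbox_py := by
  intro bbox H W pid _ hpre
  obtain ⟨rmin, cmin, rmax, cmax⟩ := bbox
  unfold Spec_compute_posed_bbox_py compute_posed_bbox_py compute_posed_bbox_py_alt applyPoseToPoint
  rcases hpre with h | h | h | h | h | h | h | h <;> subst h <;>
    simp [List.mapM, List.mapM.loop, PySem.List.min?_id_cons, PySem.List.max?_id_cons, List.foldl]
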